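-- pv_equiv track=rewrite | github.com/h-ch22/CodingTest | 프로그래머스/0/120853. 컨트롤 제트/컨트롤 제트.py | solution
-- ===== SOURCE A (Python) =====
-- def solution(s):
--     answer = 0
--     s_split = s.split()
--     stack = []
--
--     for c in s_split:
--         if c == 'Z':
--             answer -= stack[-1]
--             stack.pop()
--
--         else:
--             answer += int(c)
--             stack.append(int(c))
--
--     return answer
-- ===== SOURCE B (Python) =====
-- def solution(s):
--     total = 0
--     skip = 0
--     for c in reversed(s.split()):
--         if c == 'Z':
--             skip += 1
--         elif skip:
--             skip -= 1
--         else: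
--             total += int(c)
--     return total
-- ===== Notes on version B (the rewrite author's own statement) =====
-- stated objective: alternative
-- what changed: Replaces the forward pass with a value stack and running total by a single reverse pass keeping only a skip counter: each 'Z' increments skip, each number is either cancelled (skip > 0) or added to the total; no stack of values is ever built.
import Mathlib
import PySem

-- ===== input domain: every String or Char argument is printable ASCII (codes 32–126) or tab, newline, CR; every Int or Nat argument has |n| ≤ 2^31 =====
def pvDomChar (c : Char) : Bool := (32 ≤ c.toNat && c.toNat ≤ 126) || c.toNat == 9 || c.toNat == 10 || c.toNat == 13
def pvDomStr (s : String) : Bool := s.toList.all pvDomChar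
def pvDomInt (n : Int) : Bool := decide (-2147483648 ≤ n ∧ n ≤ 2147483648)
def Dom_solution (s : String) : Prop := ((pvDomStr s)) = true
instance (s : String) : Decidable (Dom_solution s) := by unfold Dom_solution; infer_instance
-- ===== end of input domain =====

-- B replaces A's forward value-stack-plus-running-total pass by a single reverse pass
-- that keeps only a skip counter; agreement is proved on all inputs where A returns.


-- ===== PORT A =====
-- one iteration of A's loop over state (answer, stack); int(c)/stack[-1]/stack.pop() via PySem
-- (the .getD fallbacks are unreachable inside Pre_solution, where Python A does not raise)
def solutionStepA (st : Int × List Int) (c : String) : Int × List Int :=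
  if c == "Z" then
    (st.1 - (PySem.List.pyGet? st.2 (-1)).getD 0,
     ((PySem.List.pop? st.2 (-1)).map Prod.snd).getD st.2)
  else
    (st.1 + (PySem.Int.ofStr? c).getD 0, st.2 ++ [(PySem.Int.ofStr? c).getD 0])

def solution (s : String) : Int :=
  ((PySem.Str.split₀ s).foldl solutionStepA (0, [])).1

-- ===== PORT B =====
-- one iteration of B's loop over state (skip, total); skip only moves away from 0 by +1,
-- so a Nat skip with the `elif skip:` test `st.1 ≠ 0` is exact
def solutionStepB (st : Nat × Int) (c : String) : Nat × Int :=
  if c == "Z" then (st.1 + 1, st.2)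
  else if st.1 ≠ 0 then (st.1 - 1, st.2)
  else (st.1, st.2 + (PySem.Int.ofStr? c).getD 0)

def solution_alt (s : String) : Int :=
  ((PySem.Str.split₀ s).reverse.foldl solutionStepB (0, 0)).2

-- ===== PRECONDITION & SPEC =====
-- Pre_ excludes exactly the inputs where Python A raises: a token that is neither 'Z' nor
-- int-parsable (ValueError), or a prefix with more 'Z's than numbers (IndexError on pop).
def Pre_solution (s : String) : Prop :=
  (∀ t ∈ PySem.Str.split₀ s, t = "Z" ∨ (PySem.Int.ofStr? t).isSome) ∧
  (∀ i ∈ List.range ((PySem.Str.split₀ s).length + 1),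
    ((PySem.Str.split₀ s).take i).count "Z" ≤ ((PySem.Str.split₀ s).take i).countP (· ≠ "Z"))
instance (s : String) : Decidable (Pre_solution s) := by unfold Pre_solution; infer_instance
def pvWitness_solution : String := "1 2 Z 3"
def Spec_solution (s : String) (out : Int) : Prop := out = solution_alt s
instance (s : String) (out : Int) : Decidable (Spec_solution s out) := by unfold Spec_solution; infer_instance

-- ===== CLAIM (what is proved, stated in full; the proofs are below) =====
def Claim_equal_solution : Prop := ∀ (s : String), Dom_solution s → Pre_solution s → Spec_solution s (solution s)

-- ===== LEMMAS AND PROOFS =====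

-- A's pop-at-(-1) with the noop fallback is exactly dropLast
lemma popA_eq_dropLast (stk : List Int) :
    ((PySem.List.pop? stk (-1)).map Prod.snd).getD stk = stk.dropLast := by
  induction stk using List.reverseRecOn with
  | nil => simp [PySem.List.pop?]
  | append_singleton ys y ih => simp [PySem.List.pop?_last]

-- removing the last element and re-adding its value recovers the sum (both sides 0-default on [])
lemma sum_dropLast (stk : List Int) :
    stk.dropLast.sum + (PySem.List.pyGet? stk (-1)).getD 0 = stk.sum := by
  induction stk using List.reverseRecOn with
  | nil => simp [PySem.List.pyGet?, PySem.List.pyIdx?]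
  | append_singleton ys y ih => simp [PySem.List.pyGet?_neg_one]

-- invariant of A's loop: the running answer always equals the sum of the current stack
lemma fst_eq_sum (ts : List String) (ans : Int) (stk : List Int) (h : ans = stk.sum) :
    (ts.foldl solutionStepA (ans, stk)).1 = (ts.foldl solutionStepA (ans, stk)).2.sum := by
  induction ts generalizing ans stk with
  | nil => simpa using h
  | cons c ts ih =>
      simp only [List.foldl_cons]
      by_cases hc : c == "Z"
      · have h1 := sum_dropLast stk
        simp only [solutionStepA, if_pos hc, popA_eq_dropLast]
        exact ih _ _ (by omega)
      · simp only [solutionStepA, if_neg hc]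
        exact ih _ _ (by simp [h])

-- the stack A builds, as a function of the token list
def stackOf (ts : List String) : List Int := (ts.foldl solutionStepA (0, [])).2

lemma stackOf_append (ts : List String) (c : String) :
    stackOf (ts ++ [c]) =
      if c == "Z" then (stackOf ts).dropLast
      else stackOf ts ++ [(PySem.Int.ofStr? c).getD 0] := by
  unfold stackOf
  rw [List.foldl_append, List.foldl_cons, List.foldl_nil]
  by_cases hc : c == "Z"
  · rw [if_pos hc]
    simp only [solutionStepA, if_pos hc]
    exact popA_eq_dropLast _
  · rw [if_neg hc]
    simp [solutionStepA, hc]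

-- key lemma: B's reverse skip-scan from state (k, t) computes t plus the sum of A's final
-- stack with its last k elements removed (the skip counter marks stack entries already cancelled)
lemma revscan (ts : List String) (k : Nat) (t : Int) :
    (ts.reverse.foldl solutionStepB (k, t)).2 =
      t + ((stackOf ts).take ((stackOf ts).length - k)).sum := by
  induction ts using List.reverseRecOn generalizing k t with
  | nil => simp [stackOf]
  | append_singleton ys c ih =>
      rw [List.reverse_append, List.reverse_singleton, List.singleton_append, List.foldl_cons,
        stackOf_append]
      by_cases hc : c == "Z"
      · have hs : solutionStepB (k, t) c = (k + 1, t) := by simp [solutionStepB, hc]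
        have h1 : ((stackOf ys).dropLast.take ((stackOf ys).dropLast.length - k))
            = (stackOf ys).take ((stackOf ys).length - (k + 1)) := by
          rw [List.dropLast_eq_take, List.take_take, List.length_take]
          congr 1
          omega
        rw [if_pos hc, hs, ih, h1]
      · by_cases hk : k = 0
        · subst hk
          have hs : solutionStepB (0, t) c = (0, t + (PySem.Int.ofStr? c).getD 0) := by
            simp [solutionStepB, hc]
          rw [if_neg hc, hs, ih, Nat.sub_zero, List.take_length, Nat.sub_zero, List.take_length]
          simp
          ring
        · have hs : solutionStepB (k, t) c = (k - 1, t) := by simp [solutionStepB, hc, hk]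
          have h1 : (stackOf ys ++ [(PySem.Int.ofStr? c).getD 0]).take
              ((stackOf ys ++ [(PySem.Int.ofStr? c).getD 0]).length - k)
              = (stackOf ys).take ((stackOf ys).length - (k - 1)) := by
            rw [List.length_append, List.take_append_of_le_length (by simp; omega)]
            congr 1
            simp
            omega
          rw [if_neg hc, hs, ih, h1]

-- ===== VERDICT (by name: the statement is the Claim_ definition above) =====
theorem solution_spec : Claim_equal_solution := by
  intro s _ _
  unfold Spec_solution solution solution_alt
  rw [revscan _ 0 0, fst_eq_sum _ 0 [] rfl]
  simp [stackOf]
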